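-- pv_equiv track=rewrite | github.com/pheemm/Theory_of_algoritms | competitive_placement.py | can_p2_win
-- ===== SOURCE A (Python) =====
-- def is_safe(v, selected_nodes, graph):
--     if v in selected_nodes:
--         return False
--
--     for neighbor in graph[v]:
--         if neighbor in selected_nodes:
--             return False
--
--     return True
--
-- def can_p2_win(selected, p2_score, turn_p1):
--     available = []
--     for v in graph:
--         if is_safe(v, selected, graph):
--             available.append(v)
--
--     if not available:
--         return p2_score >= target_B
--
--     if turn_p1:
--         for move in available:
--             if not can_p2_win(selected + [move], p2_score, False):
--                 return False
--         return True
--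
--     else:
--         for move in available:
--             if can_p2_win(selected + [move], p2_score + weights[move], True):
--                 return True
--         return False
--
-- graph = {0 :[1],
--          1 :[0, 2],
--          2 :[1, 3],
--          3 :[2, 4],
--          4 :[3, 5],
--          5 :[4, 6],
--          6 :[5, 7],
--          7 :[6, 8],
--          8 :[7, 9],
--          9 :[8]}
--
-- weights = [10, 1, 5, 15, 5, 1, 5, 1, 15, 10]
--
-- target_B = 25
-- ===== SOURCE B (Python) =====
-- graph = {0: [1], 1: [0, 2], 2: [1, 3], 3: [2, 4], 4: [3, 5],
--          5: [4, 6], 6: [5, 7], 7: [6, 8], 8: [7, 9], 9: [8]}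
--
-- weights = [10, 1, 5, 15, 5, 1, 5, 1, 15, 10]
--
-- target_B = 25
--
--
-- def can_p2_win(selected, p2_score, turn_p1):
--     # Compress the selected list once into a bitmask over the graph's
--     # vertices (only membership of vertices 0..9 matters), then search the
--     # game tree over (mask, score, turn) states with memoization.
--     mask = 0
--     for v in graph:
--         if v in selected:
--             mask |= 1 << v
--     memo = {}
--
--     def solve(mask, score, turn):
--         key = (mask, score, turn)
--         if key in memo:
--             return memo[key]
--         available = [v for v in graph
--                      if not (mask >> v) & 1
--                      and all(not (mask >> n) & 1 for n in graph[v])]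
--         if not available:
--             res = score >= target_B
--         elif turn:
--             results = [solve(mask | (1 << m), score, False) for m in available]
--             res = all(results)
--         else:
--             results = [solve(mask | (1 << m), score + weights[m], True) for m in available]
--             res = any(results)
--         memo[key] = res
--         return res
--
--     return solve(mask, p2_score, turn_p1)
-- ===== Notes on version B (the rewrite author's own statement) =====
-- stated objective: faster
-- what changed: B compresses the selected list once into a 10-bit mask over the graph's vertices and memoizes the game-tree search on (mask, score, turn) states, instead of A's re-scanning and copying the growing selected list at every recursive call.
import Mathlib
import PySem

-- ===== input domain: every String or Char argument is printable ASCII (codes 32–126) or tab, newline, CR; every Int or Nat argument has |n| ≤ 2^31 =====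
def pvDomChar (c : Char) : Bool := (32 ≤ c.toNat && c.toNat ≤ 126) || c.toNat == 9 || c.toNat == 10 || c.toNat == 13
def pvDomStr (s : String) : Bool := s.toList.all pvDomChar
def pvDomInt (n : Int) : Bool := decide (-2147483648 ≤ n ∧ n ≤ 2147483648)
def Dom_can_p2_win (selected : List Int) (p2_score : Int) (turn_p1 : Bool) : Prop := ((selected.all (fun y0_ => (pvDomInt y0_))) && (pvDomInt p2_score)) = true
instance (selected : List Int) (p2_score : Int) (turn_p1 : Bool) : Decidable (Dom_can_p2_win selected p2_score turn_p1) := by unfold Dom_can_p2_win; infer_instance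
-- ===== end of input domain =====

-- B replaces A's plain game-tree recursion over growing `selected` lists by a one-pass
-- bitmask compression of `selected` plus a memoized search over (mask, score, turn) states.

-- module-level constants shared by both programs
def pvGraph : PySem.Dict Int (List Int) :=
  PySem.Dict.ofList [(0,[1]),(1,[0,2]),(2,[1,3]),(3,[2,4]),(4,[3,5]),(5,[4,6]),(6,[5,7]),(7,[6,8]),(8,[7,9]),(9,[8])]

def pvWeights : List Int := [10, 1, 5, 15, 5, 1, 5, 1, 15, 10]

def pvTargetB : Int := 25

-- ===== PORT A =====

-- generic helpers for the termination measures
theorem pvLengthFilterLe {α : Type} (l : List α) (p q : α → Bool)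
    (himp : ∀ a, q a = true → p a = true) :
    (l.filter q).length ≤ (l.filter p).length := by
  induction l with
  | nil => simp
  | cons a t ih =>
    by_cases hqa : q a = true
    · rw [List.filter_cons_of_pos hqa, List.filter_cons_of_pos (himp a hqa)]
      simpa using ih
    · rw [List.filter_cons_of_neg (by simpa using hqa)]
      by_cases hpa : p a = true
      · rw [List.filter_cons_of_pos hpa]
        exact Nat.le_succ_of_le ih
      · rw [List.filter_cons_of_neg (by simpa using hpa)]
        exact ih

theorem pvLengthFilterLt {α : Type} (l : List α) (p q : α → Bool)
    (himp : ∀ a, q a = true → p a = true) (x : α)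
    (hx : x ∈ l) (hpx : p x = true) (hqx : q x = false) :
    (l.filter q).length < (l.filter p).length := by
  induction l with
  | nil => cases hx
  | cons a t ih =>
    by_cases hqa : q a = true
    · have hxa : x ≠ a := fun h => by rw [h, hqa] at hqx; cases hqx
      have hxt : x ∈ t := by
        rcases List.mem_cons.mp hx with h | h
        · exact absurd h hxa
        · exact h
      rw [List.filter_cons_of_pos hqa, List.filter_cons_of_pos (himp a hqa)]
      exact Nat.succ_lt_succ (ih hxt)
    · rw [List.filter_cons_of_neg (by simpa using hqa)]
      by_cases hpa : p a = true
      · rw [List.filter_cons_of_pos hpa]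
        exact Nat.lt_succ_of_le (pvLengthFilterLe t p q himp)
      · have hxa : x ≠ a := fun h => hpa (h ▸ hpx)
        have hxt : x ∈ t := by
          rcases List.mem_cons.mp hx with h | h
          · exact absurd h hxa
          · exact h
        rw [List.filter_cons_of_neg (by simpa using hpa)]
        exact ih hxt

-- ===== PORT A (continued) =====

def is_safe (v : Int) (selected_nodes : List Int) (g : PySem.Dict Int (List Int)) : Bool :=
  if selected_nodes.contains v then false
  else
    -- `for neighbor in graph[v]` with early False: v is always a key of graph, so getD is exact
    (PySem.Dict.getD g v []).all (fun neighbor => !selected_nodes.contains neighbor)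

-- termination measure for A: number of graph vertices not yet in `selected`
def pvFree (sel : List Int) : Nat :=
  ((PySem.Dict.keys pvGraph).filter (fun v => !sel.contains v)).length

theorem pvFree_append_lt (sel : List Int) (m : Int)
    (hm : m ∈ (PySem.Dict.keys pvGraph).filter (fun v => is_safe v sel pvGraph)) :
    pvFree (sel ++ [m]) < pvFree sel := by
  have hm' := List.mem_filter.mp hm
  have hs := hm'.2
  unfold is_safe at hs
  simp at hs
  have hc : sel.contains m = false := by simp [hs.1]
  unfold pvFree
  have hfun : ∀ v ∈ PySem.Dict.keys pvGraph,
      (!(sel ++ [m]).contains v) = ((!sel.contains v) && (!(v == m))) := by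
    intro v _
    by_cases hvm : v = m <;> by_cases hvs : v ∈ sel <;> simp [hvm, hvs]
  rw [List.filter_congr hfun]
  apply pvLengthFilterLt _ _ _ _ m hm'.1
  · simp [hs.1]
  · simp
  · intro a ha
    exact ((Bool.and_eq_true _ _).mp ha).1

def can_p2_win (selected : List Int) (p2_score : Int) (turn_p1 : Bool) : Bool :=
  -- available = [v for v in graph if is_safe(v, selected, graph)]
  let available := (PySem.Dict.keys pvGraph).filter (fun v => is_safe v selected pvGraph)
  if available.isEmpty then decide (p2_score ≥ pvTargetB)
  else if turn_p1 then
    available.attach.all (fun m => can_p2_win (selected ++ [m.1]) p2_score false)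
  else
    -- weights[move] is exact via pyGet?: move is always in 0..9 = range of weights
    available.attach.any (fun m =>
      can_p2_win (selected ++ [m.1]) (p2_score + (PySem.List.pyGet? pvWeights m.1).getD 0) true)
termination_by pvFree selected
decreasing_by
  · exact pvFree_append_lt selected m.1 m.2
  · exact pvFree_append_lt selected m.1 m.2

-- ===== PORT B =====

-- not (mask >> v) & 1  and  all(not (mask >> n) & 1 for n in graph[v])
def pvSafeBit (v : Int) (mask : Nat) : Bool :=
  !mask.testBit v.toNat &&
    (PySem.Dict.getD pvGraph v []).all (fun n => !mask.testBit n.toNat)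

-- termination measure for B: number of clear low bits
def pvFreeBits (mask : Nat) : Nat :=
  ((List.range 10).filter (fun i => !mask.testBit i)).length

theorem pvFreeBits_or_lt (mask : Nat) (m : Int)
    (hm : m ∈ (PySem.Dict.keys pvGraph).filter (fun v => pvSafeBit v mask)) :
    pvFreeBits (mask ||| (1 <<< m.toNat)) < pvFreeBits mask := by
  have hm' := List.mem_filter.mp hm
  have hk : m ∈ PySem.Dict.keys pvGraph := hm'.1
  have hlt : m.toNat < 10 := by fin_cases hk <;> decide
  have hs := hm'.2
  unfold pvSafeBit at hs
  simp at hs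
  have hb : mask.testBit m.toNat = false := by simp [hs.1]
  unfold pvFreeBits
  have hfun : ∀ i ∈ List.range 10,
      (!(mask ||| (1 <<< m.toNat)).testBit i)
        = ((!mask.testBit i) && (!(decide (m.toNat = i)))) := by
    intro i _
    simp [Nat.testBit_or, Nat.one_shiftLeft, Nat.testBit_two_pow, Bool.not_or]
  rw [List.filter_congr hfun]
  apply pvLengthFilterLt _ _ _ _ m.toNat (List.mem_range.mpr hlt)
  · simp [hb]
  · simp
  · intro a ha
    exact ((Bool.and_eq_true _ _).mp ha).1

def pvSolve (mask : Nat) (score : Int) (turn : Bool)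
    (memo : PySem.Dict (Nat × Int × Bool) Bool) :
    Bool × PySem.Dict (Nat × Int × Bool) Bool :=
  match PySem.Dict.get? memo (mask, score, turn) with
  | some b => (b, memo)
  | none =>
    let available := (PySem.Dict.keys pvGraph).filter (fun v => pvSafeBit v mask)
    let rm : Bool × PySem.Dict (Nat × Int × Bool) Bool :=
      if available.isEmpty then (decide (score ≥ pvTargetB), memo)
      else if turn then
        -- results = [solve(mask | (1 << m), score, False) for m in available]; res = all(results)
        let p := available.attach.foldl
          (fun (acc : List Bool × PySem.Dict (Nat × Int × Bool) Bool) m =>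
            let r := pvSolve (mask ||| (1 <<< m.1.toNat)) score false acc.2
            (acc.1 ++ [r.1], r.2)) ([], memo)
        (p.1.all id, p.2)
      else
        -- results = [solve(mask | (1 << m), score + weights[m], True) for m in available]; res = any(results)
        let p := available.attach.foldl
          (fun (acc : List Bool × PySem.Dict (Nat × Int × Bool) Bool) m =>
            let r := pvSolve (mask ||| (1 <<< m.1.toNat))
              (score + (PySem.List.pyGet? pvWeights m.1).getD 0) true acc.2
            (acc.1 ++ [r.1], r.2)) ([], memo)
        (p.1.any id, p.2)
    (rm.1, PySem.Dict.insert rm.2 (mask, score, turn) rm.1)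
termination_by pvFreeBits mask
decreasing_by
  · exact pvFreeBits_or_lt mask m.1 m.2
  · exact pvFreeBits_or_lt mask m.1 m.2

def can_p2_win_alt (selected : List Int) (p2_score : Int) (turn_p1 : Bool) : Bool :=
  -- mask = 0; for v in graph: if v in selected: mask |= 1 << v
  let mask := (PySem.Dict.keys pvGraph).foldl
    (fun acc v => if selected.contains v then acc ||| (1 <<< v.toNat) else acc) 0
  (pvSolve mask p2_score turn_p1 PySem.Dict.empty).1

-- ===== PRECONDITION & SPEC =====
def Spec_can_p2_win (selected : List Int) (p2_score : Int) (turn_p1 : Bool) (out : Bool) : Prop := out = can_p2_win_alt selected p2_score turn_p1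
instance (selected : List Int) (p2_score : Int) (turn_p1 : Bool) (out : Bool) : Decidable (Spec_can_p2_win selected p2_score turn_p1 out) := by unfold Spec_can_p2_win; infer_instance

-- ===== CLAIM (what is proved, stated in full; the proofs are below) =====
def Claim_equal_can_p2_win : Prop := ∀ (selected : List Int) (p2_score : Int) (turn_p1 : Bool), Dom_can_p2_win selected p2_score turn_p1 → Spec_can_p2_win selected p2_score turn_p1 (can_p2_win selected p2_score turn_p1)

-- ===== LEMMAS AND PROOFS =====

-- the bitmask built by B from a selected list
def pvMaskOf (sel : List Int) : Nat :=
  (PySem.Dict.keys pvGraph).foldl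
    (fun acc v => if sel.contains v then acc ||| (1 <<< v.toNat) else acc) 0

-- the memo-free value computed by B's search (reference function for both proofs)
def pvG (mask : Nat) (score : Int) (turn : Bool) : Bool :=
  let available := (PySem.Dict.keys pvGraph).filter (fun v => pvSafeBit v mask)
  if available.isEmpty then decide (score ≥ pvTargetB)
  else if turn then
    available.attach.all (fun m => pvG (mask ||| (1 <<< m.1.toNat)) score false)
  else
    available.attach.any (fun m =>
      pvG (mask ||| (1 <<< m.1.toNat)) (score + (PySem.List.pyGet? pvWeights m.1).getD 0) true)
termination_by pvFreeBits mask
decreasing_by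
  · exact pvFreeBits_or_lt mask m.1 m.2
  · exact pvFreeBits_or_lt mask m.1 m.2

theorem pvTestBit_foldl (sel : List Int) (ks : List Int) (a : Nat) (i : Nat) :
    ((ks.foldl (fun acc v => if sel.contains v then acc ||| (1 <<< v.toNat) else acc) a).testBit i)
      = (a.testBit i || ks.any (fun v => sel.contains v && decide (v.toNat = i))) := by
  induction ks generalizing a with
  | nil => simp
  | cons v t ih =>
    simp only [List.foldl_cons, List.any_cons]
    rw [ih]
    by_cases hc : v ∈ sel
    · simp [hc, Nat.testBit_or, Nat.one_shiftLeft, Nat.testBit_two_pow, Bool.or_assoc]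
    · simp [hc]

theorem pvMaskOf_testBit_lt (sel : List Int) (i : Nat) (hi : i < 10) :
    (pvMaskOf sel).testBit i = sel.contains (i : Int) := by
  unfold pvMaskOf
  rw [pvTestBit_foldl]
  simp only [Nat.zero_testBit, Bool.false_or]
  have hk : PySem.Dict.keys pvGraph = [0,1,2,3,4,5,6,7,8,9] := rfl
  rw [hk]
  interval_cases i <;> simp [List.any_cons, List.any_nil]

theorem pvMaskOf_testBit_ge (sel : List Int) (i : Nat) (hi : 10 ≤ i) :
    (pvMaskOf sel).testBit i = false := by
  unfold pvMaskOf
  rw [pvTestBit_foldl]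
  simp only [Nat.zero_testBit, Bool.false_or]
  rw [Bool.eq_false_iff]
  intro h
  rw [List.any_eq_true] at h
  obtain ⟨v, hv, hvc⟩ := h
  fin_cases hv <;> simp at hvc <;> omega

theorem pvSafe_eq (sel : List Int) (v : Int) (hv : v ∈ PySem.Dict.keys pvGraph) :
    is_safe v sel pvGraph = pvSafeBit v (pvMaskOf sel) := by
  have hbI : ∀ (w : Int), w ∈ PySem.Dict.keys pvGraph →
      (pvMaskOf sel).testBit w.toNat = sel.contains w := by
    intro w hw
    fin_cases hw <;> exact pvMaskOf_testBit_lt sel _ (by norm_num)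
  fin_cases hv <;>
    (simp only [is_safe, pvSafeBit, List.all_cons, List.all_nil,
      show PySem.Dict.getD pvGraph 0 [] = [1] from rfl,
      show PySem.Dict.getD pvGraph 1 [] = [0,2] from rfl,
      show PySem.Dict.getD pvGraph 2 [] = [1,3] from rfl,
      show PySem.Dict.getD pvGraph 3 [] = [2,4] from rfl,
      show PySem.Dict.getD pvGraph 4 [] = [3,5] from rfl,
      show PySem.Dict.getD pvGraph 5 [] = [4,6] from rfl,
      show PySem.Dict.getD pvGraph 6 [] = [5,7] from rfl,
      show PySem.Dict.getD pvGraph 7 [] = [6,8] from rfl,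
      show PySem.Dict.getD pvGraph 8 [] = [7,9] from rfl,
      show PySem.Dict.getD pvGraph 9 [] = [8] from rfl,
      hbI 0 (by decide), hbI 1 (by decide),
      hbI 2 (by decide), hbI 3 (by decide),
      hbI 4 (by decide), hbI 5 (by decide),
      hbI 6 (by decide), hbI 7 (by decide),
      hbI 8 (by decide), hbI 9 (by decide)] <;>
     split_ifs with h <;> simp at h <;> simp [h])

theorem pvMaskOf_append (sel : List Int) (m : Int) (hm : m ∈ PySem.Dict.keys pvGraph) :
    pvMaskOf (sel ++ [m]) = pvMaskOf sel ||| (1 <<< m.toNat) := by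
  have hgen : ∀ (mv : Int), 0 ≤ mv → mv.toNat < 10 →
      pvMaskOf (sel ++ [mv]) = pvMaskOf sel ||| (1 <<< mv.toNat) := by
    intro mv h0 h10
    apply Nat.eq_of_testBit_eq
    intro i
    rcases Nat.lt_or_ge i 10 with hi | hi
    · rw [Nat.testBit_or, pvMaskOf_testBit_lt _ _ hi, pvMaskOf_testBit_lt _ _ hi,
        Nat.one_shiftLeft, Nat.testBit_two_pow]
      by_cases he : mv.toNat = i
      · have heq : (i : Int) = mv := by omega
        simp [← heq]
      · have hne : ¬((i : Int) = mv) := by omega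
        simp [hne, he]
    · rw [Nat.testBit_or, pvMaskOf_testBit_ge _ _ hi, pvMaskOf_testBit_ge _ _ hi,
        Nat.one_shiftLeft, Nat.testBit_two_pow]
      simp [show mv.toNat ≠ i by omega]
  fin_cases hm <;> exact hgen _ (by decide) (by decide)

theorem pvBoolEq (a b : Bool) (h : a = true ↔ b = true) : a = b := by
  cases a <;> cases b <;> simp_all

theorem pvA_eq_pvG (sel : List Int) (score : Int) (turn : Bool) :
    can_p2_win sel score turn = pvG (pvMaskOf sel) score turn := by
  have H : ∀ (n : Nat) (sel : List Int) (score : Int) (turn : Bool), pvFree sel = n →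
      can_p2_win sel score turn = pvG (pvMaskOf sel) score turn := by
    intro n
    induction n using Nat.strong_induction_on with
    | _ n ih =>
      intro sel score turn hn
      rw [can_p2_win, pvG]
      have havail : (PySem.Dict.keys pvGraph).filter (fun v => is_safe v sel pvGraph)
          = (PySem.Dict.keys pvGraph).filter (fun v => pvSafeBit v (pvMaskOf sel)) :=
        List.filter_congr (fun v hv => pvSafe_eq sel v hv)
      simp only [havail]
      by_cases hemp :
          ((PySem.Dict.keys pvGraph).filter (fun v => pvSafeBit v (pvMaskOf sel))).isEmpty = true
      · simp [hemp]
      · rw [Bool.not_eq_true] at hemp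
        simp only [hemp, Bool.false_eq_true, if_false]
        have hrec : ∀ m (hm : m ∈ (PySem.Dict.keys pvGraph).filter
              (fun v => pvSafeBit v (pvMaskOf sel))) (sc : Int) (tn : Bool),
            can_p2_win (sel ++ [m]) sc tn = pvG (pvMaskOf sel ||| (1 <<< m.toNat)) sc tn := by
          intro m hm sc tn
          have hmA : m ∈ (PySem.Dict.keys pvGraph).filter (fun v => is_safe v sel pvGraph) := by
            rw [havail]; exact hm
          have hkm : m ∈ PySem.Dict.keys pvGraph := (List.mem_filter.mp hmA).1
          rw [ih (pvFree (sel ++ [m])) (by rw [← hn]; exact pvFree_append_lt sel m hmA)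
            (sel ++ [m]) sc tn rfl, pvMaskOf_append sel m hkm]
        cases turn
        · simp only [Bool.false_eq_true, if_false]
          apply pvBoolEq
          simp only [List.any_eq_true, List.mem_attach, true_and, Subtype.exists]
          constructor
          · rintro ⟨x, hx, hfx⟩
            have hxB : x ∈ (PySem.Dict.keys pvGraph).filter
                (fun v => pvSafeBit v (pvMaskOf sel)) := by rw [← havail]; exact hx
            exact ⟨x, hxB, by rw [← hrec x hxB]; exact hfx⟩
          · rintro ⟨x, hxB, hfx⟩
            have hxA : x ∈ (PySem.Dict.keys pvGraph).filter
                (fun v => is_safe v sel pvGraph) := by rw [havail]; exact hxB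
            exact ⟨x, hxA, by rw [hrec x hxB]; exact hfx⟩
        · simp only [if_true]
          apply pvBoolEq
          simp only [List.all_eq_true, List.mem_attach, forall_const, Subtype.forall]
          constructor
          · intro hall x hxB
            have hxA : x ∈ (PySem.Dict.keys pvGraph).filter
                (fun v => is_safe v sel pvGraph) := by rw [havail]; exact hxB
            rw [← hrec x hxB]
            exact hall x hxA
          · intro hall x hxA
            have hxB : x ∈ (PySem.Dict.keys pvGraph).filter
                (fun v => pvSafeBit v (pvMaskOf sel)) := by rw [← havail]; exact hxA
            rw [hrec x hxB]
            exact hall x hxB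
  exact H (pvFree sel) sel score turn rfl

def pvValid (memo : PySem.Dict (Nat × Int × Bool) Bool) : Prop :=
  ∀ k b, PySem.Dict.get? memo k = some b → b = pvG k.1 k.2.1 k.2.2

theorem pvValid_insert (memo : PySem.Dict (Nat × Int × Bool) Bool)
    (mask : Nat) (score : Int) (turn : Bool) (b : Bool)
    (hb : b = pvG mask score turn) (hv : pvValid memo) :
    pvValid (PySem.Dict.insert memo (mask, score, turn) b) := by
  intro k b' hk
  rw [PySem.Dict.get?_insert] at hk
  by_cases h : k = (mask, score, turn)
  · rw [if_pos h] at hk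
    cases hk
    subst h
    simpa using hb
  · rw [if_neg h] at hk
    exact hv k b' hk

theorem pvSolve_correct (n : Nat) (mask : Nat) (score : Int) (turn : Bool)
    (memo : PySem.Dict (Nat × Int × Bool) Bool)
    (hn : pvFreeBits mask = n) (hv : pvValid memo) :
    (pvSolve mask score turn memo).1 = pvG mask score turn ∧
      pvValid (pvSolve mask score turn memo).2 := by
  induction n using Nat.strong_induction_on generalizing mask score turn memo with
  | _ n ih =>
    rw [pvSolve]
    cases hget : PySem.Dict.get? memo (mask, score, turn) with
    | some b =>
      simp only
      exact ⟨hv (mask, score, turn) b hget, hv⟩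
    | none =>
      simp only
      by_cases hemp :
          ((PySem.Dict.keys pvGraph).filter (fun v => pvSafeBit v mask)).isEmpty = true
      · rw [if_pos hemp]
        have hres : decide (score ≥ pvTargetB) = pvG mask score turn := by
          rw [pvG]
          simp [hemp]
        exact ⟨hres, pvValid_insert memo mask score turn _ hres hv⟩
      · rw [if_neg hemp]
        cases turn with
        | true =>
          rw [if_pos rfl]
          have hfold : ∀ (l : List {x // x ∈ (PySem.Dict.keys pvGraph).filter
                (fun v => pvSafeBit v mask)}) (bs : List Bool)
              (mm : PySem.Dict (Nat × Int × Bool) Bool), pvValid mm →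
              (List.foldl (fun acc m =>
                  (acc.1 ++ [(pvSolve (mask ||| 1 <<< m.1.toNat) score false acc.2).1],
                    (pvSolve (mask ||| 1 <<< m.1.toNat) score false acc.2).2)) (bs, mm) l).1
                = bs ++ l.map (fun m => pvG (mask ||| 1 <<< m.1.toNat) score false)
              ∧ pvValid (List.foldl (fun acc m =>
                  (acc.1 ++ [(pvSolve (mask ||| 1 <<< m.1.toNat) score false acc.2).1],
                    (pvSolve (mask ||| 1 <<< m.1.toNat) score false acc.2).2)) (bs, mm) l).2 := by
            intro l
            induction l with
            | nil => intro bs mm hmm; exact ⟨by simp, hmm⟩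
            | cons mhd tl ihl =>
              intro bs mm hmm
              simp only [List.foldl_cons]
              have hlt : pvFreeBits (mask ||| 1 <<< mhd.1.toNat) < n :=
                hn ▸ pvFreeBits_or_lt mask mhd.1 mhd.2
              have hrec := ih _ hlt (mask ||| 1 <<< mhd.1.toNat) score false mm rfl hmm
              have h2 := ihl (bs ++ [(pvSolve (mask ||| 1 <<< mhd.1.toNat) score false mm).1])
                ((pvSolve (mask ||| 1 <<< mhd.1.toNat) score false mm).2) hrec.2
              refine ⟨?_, h2.2⟩
              rw [h2.1, hrec.1]
              simp
          have hm := hfold ((PySem.Dict.keys pvGraph).filter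
            (fun v => pvSafeBit v mask)).attach [] memo hv
          have hfst : (List.foldl (fun acc m =>
              (acc.1 ++ [(pvSolve (mask ||| 1 <<< m.1.toNat) score false acc.2).1],
                (pvSolve (mask ||| 1 <<< m.1.toNat) score false acc.2).2)) ([], memo)
              ((PySem.Dict.keys pvGraph).filter (fun v => pvSafeBit v mask)).attach).1.all id
              = pvG mask score true := by
            rw [hm.1]
            conv_rhs => rw [pvG]
            rw [if_neg hemp, if_pos rfl]
            simp [List.all_map]
          exact ⟨hfst, pvValid_insert _ mask score true _ hfst hm.2⟩
        | false =>
          rw [if_neg Bool.false_ne_true]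
          have hfold : ∀ (l : List {x // x ∈ (PySem.Dict.keys pvGraph).filter
                (fun v => pvSafeBit v mask)}) (bs : List Bool)
              (mm : PySem.Dict (Nat × Int × Bool) Bool), pvValid mm →
              (List.foldl (fun acc m =>
                  (acc.1 ++ [(pvSolve (mask ||| 1 <<< m.1.toNat)
                      (score + (PySem.List.pyGet? pvWeights m.1).getD 0) true acc.2).1],
                    (pvSolve (mask ||| 1 <<< m.1.toNat)
                      (score + (PySem.List.pyGet? pvWeights m.1).getD 0) true acc.2).2)) (bs, mm) l).1
                = bs ++ l.map (fun m => pvG (mask ||| 1 <<< m.1.toNat)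
                    (score + (PySem.List.pyGet? pvWeights m.1).getD 0) true)
              ∧ pvValid (List.foldl (fun acc m =>
                  (acc.1 ++ [(pvSolve (mask ||| 1 <<< m.1.toNat)
                      (score + (PySem.List.pyGet? pvWeights m.1).getD 0) true acc.2).1],
                    (pvSolve (mask ||| 1 <<< m.1.toNat)
                      (score + (PySem.List.pyGet? pvWeights m.1).getD 0) true acc.2).2)) (bs, mm) l).2 := by
            intro l
            induction l with
            | nil => intro bs mm hmm; exact ⟨by simp, hmm⟩
            | cons mhd tl ihl =>
              intro bs mm hmm
              simp only [List.foldl_cons]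
              have hlt : pvFreeBits (mask ||| 1 <<< mhd.1.toNat) < n :=
                hn ▸ pvFreeBits_or_lt mask mhd.1 mhd.2
              have hrec := ih _ hlt (mask ||| 1 <<< mhd.1.toNat)
                (score + (PySem.List.pyGet? pvWeights mhd.1).getD 0) true mm rfl hmm
              have h2 := ihl (bs ++ [(pvSolve (mask ||| 1 <<< mhd.1.toNat)
                  (score + (PySem.List.pyGet? pvWeights mhd.1).getD 0) true mm).1])
                ((pvSolve (mask ||| 1 <<< mhd.1.toNat)
                  (score + (PySem.List.pyGet? pvWeights mhd.1).getD 0) true mm).2) hrec.2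
              refine ⟨?_, h2.2⟩
              rw [h2.1, hrec.1]
              simp
          have hm := hfold ((PySem.Dict.keys pvGraph).filter
            (fun v => pvSafeBit v mask)).attach [] memo hv
          have hfst : (List.foldl (fun acc m =>
              (acc.1 ++ [(pvSolve (mask ||| 1 <<< m.1.toNat)
                  (score + (PySem.List.pyGet? pvWeights m.1).getD 0) true acc.2).1],
                (pvSolve (mask ||| 1 <<< m.1.toNat)
                  (score + (PySem.List.pyGet? pvWeights m.1).getD 0) true acc.2).2)) ([], memo)
              ((PySem.Dict.keys pvGraph).filter (fun v => pvSafeBit v mask)).attach).1.any id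
              = pvG mask score false := by
            rw [hm.1]
            conv_rhs => rw [pvG]
            rw [if_neg hemp, if_neg Bool.false_ne_true]
            simp [List.any_map]
          exact ⟨hfst, pvValid_insert _ mask score false _ hfst hm.2⟩

-- ===== VERDICT (by name: the statement is the Claim_ definition above) =====
theorem can_p2_win_spec : Claim_equal_can_p2_win := by
  intro sel score turn _
  unfold Spec_can_p2_win can_p2_win_alt
  have hempty : pvValid PySem.Dict.empty := by
    intro k b h
    simp [PySem.Dict.get?_empty] at h
  have := (pvSolve_correct (pvFreeBits (pvMaskOf sel)) (pvMaskOf sel) score turn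
    PySem.Dict.empty rfl hempty).1
  rw [pvA_eq_pvG]
  exact (this.symm)
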